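-- pv_equiv track=rewrite | github.com/ar90n/lab | contest/atcoder/abc076/C/main.py | solve
-- ===== SOURCE A (Python) =====
-- def solve(S, T):
--     res = []
--     for i in range(len(S) - len(T) + 1):
--         cc = S[:i] + T + S[i+len(T):]
--         q = set([s for s,c in zip(S, cc) if s != c])
--         if q == set(['?']) or q == set():
--             res.append(cc.replace('?', 'a'))
--
--     res.sort()
--     if 0 < len(res):
--         return res[0]
--
--     return 'UNRESTORABLE'
-- ===== SOURCE B (Python) =====
-- def solve(S, T):
--     n, m = len(S), len(T)
--     Tr = T.replace('?', 'a')
--     Q = [p for p, ch in enumerate(S) if ch == '?']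
--     base = [ch if ch != '?' else 'a' for ch in S]
--     besti = None
--     bestkey = None
--     for i in range(n - m + 1):
--         if all(S[i + k] == '?' or S[i + k] == T[k] for k in range(m)):
--             key = ''.join(Tr[p - i] if i <= p < i + m else 'a' for p in Q)
--             if bestkey is None or key < bestkey:
--                 besti, bestkey = i, key
--     if besti is None:
--         return 'UNRESTORABLE'
--     for k in range(m):
--         base[besti + k] = Tr[k]
--     return ''.join(base)
-- ===== Notes on version B (the rewrite author's own statement) =====
-- stated objective: alternative
-- what changed: B selects the best placement by comparing only the characters that land on S's '?' positions (a short 'key' per valid offset, since all candidates agree everywhere else) and builds the output string once by patching T into the '?'->'a' base, instead of constructing every full candidate string, set-comparing the whole zip, and sorting all candidates.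
import Mathlib
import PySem

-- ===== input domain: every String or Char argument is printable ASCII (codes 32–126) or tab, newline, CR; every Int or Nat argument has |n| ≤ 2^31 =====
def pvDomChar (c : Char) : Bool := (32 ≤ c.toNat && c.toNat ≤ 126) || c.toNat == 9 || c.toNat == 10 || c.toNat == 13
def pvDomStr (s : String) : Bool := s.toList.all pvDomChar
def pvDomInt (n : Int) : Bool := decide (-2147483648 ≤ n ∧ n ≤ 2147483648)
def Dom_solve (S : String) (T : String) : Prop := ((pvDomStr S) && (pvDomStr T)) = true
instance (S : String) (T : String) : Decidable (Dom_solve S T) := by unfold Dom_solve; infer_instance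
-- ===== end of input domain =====

-- B compares placements only through the characters at S's '?' positions (all candidates
-- agree everywhere else) and builds the output once by patching the '?'→'a' base string,
-- instead of building every full candidate string and sorting the list of candidates.

-- ===== PORT A =====
-- cc = S[:i] + T + S[i+len(T):]
def pvCand (S T : List Char) (i : Int) : List Char :=
  PySem.List.slice S none (some i) ++ T ++ PySem.List.slice S (some (i + (T.length : Int))) none

-- cc.replace('?', 'a')
def pvCandStr (S T : List Char) (i : Int) : String :=
  String.ofList (PySem.Chars.replace (pvCand S T i) ['?'] ['a'])

-- q = set([s for s,c in zip(S, cc) if s != c]); q == set(['?']) or q == set()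
def pvOkA (S T : List Char) (i : Int) : Bool :=
  let q := PySem.Set.ofList (((S.zip (pvCand S T i)).filter (fun p => p.1 != p.2)).map Prod.fst)
  PySem.Set.equal q (PySem.Set.ofList ['?']) || PySem.Set.equal q PySem.Set.empty

def solve (S : String) (T : String) : String :=
  let res := (PySem.List.pyRange 0 (PySem.Str.len S - PySem.Str.len T + 1) 1).foldl
    (fun res i =>
      if pvOkA S.toList T.toList i then res ++ [pvCandStr S.toList T.toList i] else res) []
  let res := PySem.List.sorted res (fun x => x) false
  if 0 < res.length then PySem.List.pyGetD res 0 "" else "UNRESTORABLE"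

-- ===== PORT B =====
-- Tr = T.replace('?', 'a')
def pvRepChars (l : List Char) : List Char := PySem.Chars.replace l ['?'] ['a']

-- Q = [p for p, ch in enumerate(S) if ch == '?']
def pvQ (S : List Char) : List Int :=
  ((PySem.List.enumerate S 0).filter (fun p => p.2 == '?')).map Prod.fst

-- base = [ch if ch != '?' else 'a' for ch in S]
def pvBase (S : List Char) : List Char := S.map (fun ch => if ch != '?' then ch else 'a')

-- all(S[i + k] == '?' or S[i + k] == T[k] for k in range(m))   (indices always in range here)
def pvOkB (S T : List Char) (i : Int) : Bool :=
  (PySem.List.pyRange 0 (T.length : Int) 1).all (fun k =>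
    PySem.List.pyGetD S (i + k) ' ' == '?' ||
    PySem.List.pyGetD S (i + k) ' ' == PySem.List.pyGetD T k ' ')

-- key = ''.join(Tr[p - i] if i <= p < i + m else 'a' for p in Q)
def pvKey (Tr : List Char) (Q : List Int) (i m : Int) : String :=
  String.ofList (Q.map (fun p =>
    if i ≤ p ∧ p < i + m then PySem.List.pyGetD Tr (p - i) ' ' else 'a'))

-- if ok: key = …; if bestkey is None or key < bestkey: besti, bestkey = i, key
def pvStep (S T Tr : List Char) (Q : List Int) (st : Option Int × Option String) (i : Int) :
    Option Int × Option String :=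
  if pvOkB S T i then
    let key := pvKey Tr Q i (T.length : Int)
    match st.2 with
    | none => (some i, some key)
    | some bk => if key < bk then (some i, some key) else st
  else st

def solve_alt (S : String) (T : String) : String :=
  let Sl := S.toList
  let Tr := pvRepChars T.toList
  let Q := pvQ Sl
  let st := (PySem.List.pyRange 0 (PySem.Str.len S - PySem.Str.len T + 1) 1).foldl
    (pvStep Sl T.toList Tr Q) (none, none)
  match st.1 with
  | none => "UNRESTORABLE"
  | some bi =>
    -- for k in range(m): base[besti + k] = Tr[k]   (besti + k is a valid nonnegative index)
    String.ofList ((PySem.List.pyRange 0 (PySem.Str.len T) 1).foldl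
      (fun base k => base.set (bi + k).toNat (PySem.List.pyGetD Tr k ' ')) (pvBase Sl))

-- ===== PRECONDITION & SPEC =====
def Spec_solve (S : String) (T : String) (out : String) : Prop := out = solve_alt S T
instance (S : String) (T : String) (out : String) : Decidable (Spec_solve S T out) := by unfold Spec_solve; infer_instance

-- ===== CLAIM (what is proved, stated in full; the proofs are below) =====
def Claim_equal_solve : Prop := ∀ (S : String) (T : String), Dom_solve S T → Spec_solve S T (solve S T)

-- ===== LEMMAS AND PROOFS =====

-- '?' → 'a', the per-character effect of .replace('?','a')
def rep (c : Char) : Char := if c = '?' then 'a' else c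

-- the characters of X sitting at the '?' positions of S
def projQ (S X : List Char) : List Char :=
  ((S.zip X).filter (fun p => p.1 == '?')).map Prod.snd

-- the candidate string for offset k, already '?'→'a'-replaced
def candL (S T : List Char) (k : Nat) : List Char :=
  (S.take k).map rep ++ T.map rep ++ (S.drop (k + T.length)).map rep

-- "T fits at offset k": every window cell is '?' or already T's character
def okWinProp (S T : List Char) (k : Nat) : Prop :=
  ∀ j < T.length, S.getD (k + j) ' ' = '?' ∨ S.getD (k + j) ' ' = T.getD j ' '

-- A's running-minimum readout helper (if best is None or cand < best)
def pvMinUpd (best : Option String) (cand : String) : Option String :=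
  match best with
  | none => some cand
  | some b => if cand < b then some cand else some b

theorem rep_go (l acc : List Char) :
    PySem.Chars.replace.go ['?'] ['a'] l.length l acc = acc.reverse ++ l.map rep := by
  induction l generalizing acc with
  | nil => simp [PySem.Chars.replace.go]
  | cons c t ih =>
    rw [show (c :: t).length = t.length + 1 from rfl]
    by_cases hc : c = '?'
    · subst hc
      simpa [PySem.Chars.replace.go, List.isPrefixOf, rep] using ih ('a' :: acc)
    · have h2 : ¬ ('?' = c) := fun h => hc h.symm
      simpa [PySem.Chars.replace.go, List.isPrefixOf, h2, rep, hc] using ih (c :: acc)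

theorem replace_eq_map (l : List Char) :
    PySem.Chars.replace l ['?'] ['a'] = l.map rep := by
  simpa [PySem.Chars.replace] using rep_go l []

-- pairs zipped from a list with itself never mismatch
theorem pv_zip_self_filter_ne (l : List Char) :
    (l.zip l).filter (fun p => p.1 != p.2) = [] := by
  induction l with
  | nil => rfl
  | cons x t ih => simpa using ih

-- zip of two appends with equal-length first parts (explicit-argument wrapper for rewriting)
theorem pv_zip_append (A B : List Char) (C D : List Char) (h : A.length = C.length) :
    (A ++ B).zip (C ++ D) = A.zip C ++ B.zip D := List.zip_append h

-- the mismatch list of A's whole-string zip equals the mismatch list of the window zip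
theorem pv_mismatch_eq (S T : List Char) (k : Nat) (h : k + T.length ≤ S.length) :
    (S.zip (S.take k ++ (T ++ S.drop (k + T.length)))).filter (fun p => p.1 != p.2) =
    (((S.drop k).take T.length).zip T).filter (fun p => p.1 != p.2) := by
  set A := S.take k with hA
  set W := (S.drop k).take T.length with hW
  set R := S.drop (k + T.length) with hR
  have hWlen : W.length = T.length := by rw [hW]; simp; omega
  have hS : S = A ++ (W ++ R) := by
    have h1 : (S.drop k).drop T.length = S.drop (k + T.length) := by
      rw [List.drop_drop]
    rw [hA, hW, hR, ← h1, List.take_append_drop, List.take_append_drop]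
  conv_lhs => rw [hS]
  rw [pv_zip_append A (W ++ R) A (T ++ R) rfl, pv_zip_append W R T R hWlen,
      List.filter_append, List.filter_append,
      pv_zip_self_filter_ne A, pv_zip_self_filter_ne R]
  simp

-- A's zip-the-whole-string test, reduced to a test of the window alone
def pvWinAll (S T : List Char) (i : Int) : Bool :=
  ((PySem.List.slice S (some i) (some (i + (T.length : Int)))).zip T).all
    (fun p => p.1 == p.2 || p.1 == '?')

-- A's set test agrees with the window test on in-range offsets
theorem pv_ok_eq (S T : List Char) (k : Nat) (h : k + T.length ≤ S.length) :
    pvOkA S T (k : Int) = pvWinAll S T (k : Int) := by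
  have hcand : pvCand S T (k : Int) = S.take k ++ (T ++ S.drop (k + T.length)) := by
    unfold pvCand
    rw [PySem.List.slice_to_natCast]
    have : (k : Int) + (T.length : Int) = ((k + T.length : Nat) : Int) := by push_cast; ring
    rw [this, PySem.List.slice_from_natCast]
    simp
  have hwin : PySem.List.slice S (some (k : Int)) (some ((k : Int) + (T.length : Int))) =
      (S.drop k).take T.length := PySem.List.slice_natCast_add S k T.length
  rw [Bool.eq_iff_iff]
  unfold pvOkA pvWinAll
  rw [hcand, hwin]
  simp only [pv_mismatch_eq S T k h]
  constructor
  · intro hA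
    rw [Bool.or_eq_true, PySem.Set.equal_iff, PySem.Set.equal_iff] at hA
    rw [List.all_eq_true]
    rintro ⟨s, c⟩ hmem
    simp only [Bool.or_eq_true, beq_iff_eq]
    by_cases hsc : s = c
    · exact Or.inl hsc
    · right
      have hin : s ∈ PySem.Set.ofList
          (((((S.drop k).take T.length).zip T).filter (fun p => p.1 != p.2)).map Prod.fst) := by
        rw [PySem.Set.mem_ofList]
        exact List.mem_map.mpr ⟨(s, c), List.mem_filter.mpr ⟨hmem, by simpa using hsc⟩, rfl⟩
      rcases hA with hA | hA
      · have := (hA s).mp hin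
        rw [PySem.Set.mem_ofList] at this
        simpa using this
      · have := (hA s).mp hin
        simp [PySem.Set.empty] at this
  · intro hB
    rw [List.all_eq_true] at hB
    have hall : ∀ x ∈ ((((S.drop k).take T.length).zip T).filter
        (fun p => p.1 != p.2)).map Prod.fst, x = '?' := by
      intro x hx
      rcases List.mem_map.mp hx with ⟨⟨s, c⟩, hp, hfst⟩
      rcases List.mem_filter.mp hp with ⟨hmem, hne⟩
      have := hB (s, c) hmem
      simp only [Bool.or_eq_true, beq_iff_eq] at this
      rcases this with h1 | h1
      · simp [h1] at hne
      · rw [← hfst]; exact h1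
    rw [Bool.or_eq_true, PySem.Set.equal_iff, PySem.Set.equal_iff]
    by_cases hq : '?' ∈ ((((S.drop k).take T.length).zip T).filter
        (fun p => p.1 != p.2)).map Prod.fst
    · left
      intro x
      rw [PySem.Set.mem_ofList, PySem.Set.mem_ofList]
      constructor
      · intro hx; simpa using hall x hx
      · intro hx; simp at hx; rw [hx]; exact hq
    · right
      intro x
      rw [PySem.Set.mem_ofList]
      simp only [PySem.Set.empty, List.not_mem_nil, iff_false]
      intro hx
      exact hq (by rwa [hall x hx] at hx)

theorem winAll_iff (S T : List Char) (k : Nat) (h : k + T.length ≤ S.length) :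
    pvWinAll S T (k : Int) = true ↔ okWinProp S T k := by
  unfold pvWinAll okWinProp
  rw [PySem.List.slice_natCast_add, List.all_eq_true]
  have hWlen : ((S.drop k).take T.length).length = T.length := by simp; omega
  have hzlen : ((((S.drop k).take T.length)).zip T).length = T.length := by simp [hWlen]
  have hWj : ∀ j (hj : j < T.length), ((S.drop k).take T.length)[j]'(by omega) = S[k + j]'(by omega) := by
    intro j hj
    simp [List.getElem_take, List.getElem_drop]
  constructor
  · intro hall j hj
    have hmem : (((S.drop k).take T.length)[j]'(by omega), T[j]) ∈ ((S.drop k).take T.length).zip T := by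
      have h1 : ((((S.drop k).take T.length)).zip T)[j]'(by omega) =
          (((S.drop k).take T.length)[j]'(by omega), T[j]) := List.getElem_zip
      rw [← h1]
      exact List.getElem_mem _
    have := hall _ hmem
    simp only [Bool.or_eq_true, beq_iff_eq] at this
    rw [hWj j hj] at this
    rw [List.getD_eq_getElem _ _ (by omega : k + j < S.length), List.getD_eq_getElem _ _ hj]
    tauto
  · intro hp x hx
    rw [List.mem_iff_getElem] at hx
    obtain ⟨j, hjlen, rfl⟩ := hx
    rw [hzlen] at hjlen
    rw [List.getElem_zip]
    simp only [Bool.or_eq_true, beq_iff_eq]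
    have := hp j hjlen
    rw [List.getD_eq_getElem _ _ (by omega : k + j < S.length), List.getD_eq_getElem _ _ hjlen] at this
    rw [hWj j hjlen]
    tauto

theorem okB_iff (S T : List Char) (k : Nat) :
    pvOkB S T (k : Int) = true ↔ okWinProp S T k := by
  unfold pvOkB okWinProp
  rw [List.all_eq_true]
  constructor
  · intro hb j hj
    have := hb ((j : Nat) : Int) (by rw [PySem.List.mem_pyRange_one]; constructor <;> [positivity; (push_cast; omega)])
    rw [show (k : Int) + (j : Nat) = ((k + j : Nat) : Int) by push_cast; ring,
        PySem.List.pyGetD_natCast, PySem.List.pyGetD_natCast] at this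
    simpa using this
  · intro hp i hi
    rw [PySem.List.mem_pyRange_one] at hi
    obtain ⟨h0, hlt⟩ := hi
    have hj : i = ((i.toNat : Nat) : Int) := (Int.toNat_of_nonneg h0).symm
    rw [hj, show (k : Int) + (i.toNat : Nat) = ((k + i.toNat : Nat) : Int) by push_cast; ring,
        PySem.List.pyGetD_natCast, PySem.List.pyGetD_natCast]
    have := hp i.toNat (by omega)
    simpa using this

theorem okA_eq_okB (S T : List Char) (k : Nat) (h : k + T.length ≤ S.length) :
    pvOkA S T (k : Int) = pvOkB S T (k : Int) := by
  rw [pv_ok_eq S T k h, Bool.eq_iff_iff, winAll_iff S T k h, okB_iff S T k]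

theorem length_candL (S T : List Char) (k : Nat) (h : k + T.length ≤ S.length) :
    (candL S T k).length = S.length := by
  unfold candL; simp; omega

-- at a non-'?' position every valid candidate shows rep of S's own character
theorem cand_getD_of_ne (S T : List Char) (k : Nat) (h : k + T.length ≤ S.length)
    (hok : okWinProp S T k) (p : Nat) (hp : p < S.length) (hne : S.getD p ' ' ≠ '?') :
    (candL S T k).getD p ' ' = rep (S.getD p ' ') := by
  unfold candL
  have htl : ((S.take k).map rep).length = k := by simp; omega
  have hml : (T.map rep).length = T.length := by simp
  rcases lt_or_ge p k with hpk | hpk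
  · rw [List.getD_append _ _ _ p (by rw [List.length_append, htl, hml]; omega),
        List.getD_append _ _ _ p (by rw [htl]; omega)]
    rw [List.getD_eq_getElem _ _ (by rw [htl]; omega), List.getD_eq_getElem _ _ hp]
    simp [List.getElem_take]
  · rcases lt_or_ge p (k + T.length) with hpm | hpm
    · rw [List.getD_append _ _ _ p (by rw [List.length_append, htl, hml]; omega),
        List.getD_append_right _ _ _ p (by omega)]
      rw [htl]
      have hj : p - k < T.length := by omega
      rw [List.getD_eq_getElem _ _ (by simpa using hj)]
      have hcell := hok (p - k) hj
      rw [show k + (p - k) = p by omega] at hcell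
      rcases hcell with hq | he
      · exact absurd hq hne
      · rw [List.getElem_map]
        rw [List.getD_eq_getElem _ _ hj] at he
        rw [he]
    · rw [List.getD_append_right _ _ _ p (by rw [List.length_append, htl, hml]; omega)]
      rw [List.length_append, htl, hml]
      rw [List.getD_eq_getElem _ _ hp]
      rw [List.getD_eq_getElem?_getD, List.getElem?_map, List.getElem?_drop,
          show k + T.length + (p - (k + T.length)) = p from by omega,
          List.getElem?_eq_getElem hp]
      simp

theorem projQ_append (U U' V V' : List Char) (h : U.length = V.length) :
    projQ (U ++ U') (V ++ V') = projQ U V ++ projQ U' V' := by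
  simp [projQ, List.zip_append h, List.filter_append]

theorem keypart_const (U : List Char) (g : Int × Char → Char) :
    ∀ (s : Int), (∀ q : Int × Char, s ≤ q.1 → q.1 < s + U.length → g q = 'a') →
    ((PySem.List.enumerate U s).filter (fun q => q.2 == '?')).map g =
      List.replicate (U.count '?') 'a' := by
  induction U with
  | nil => intro s _; simp [PySem.List.enumerate]
  | cons u U' ih =>
    intro s hf
    have htail := ih (s + 1) (fun q h1 h2 => hf q (by omega) (by simp only [List.length_cons]; push_cast; push_cast at h2; omega))
    rw [PySem.List.enumerate_cons]
    by_cases hu : u = '?'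
    · subst hu
      have hs : g (s, '?') = 'a' := hf (s, '?') le_rfl (by simp only [List.length_cons]; push_cast; omega)
      simp [List.count_cons, htail, hs, List.replicate_succ]
    · simp [hu, htail]

theorem proj_rep (U : List Char) : projQ U (U.map rep) = List.replicate (U.count '?') 'a' := by
  induction U with
  | nil => rfl
  | cons u U' ih =>
    by_cases hu : u = '?'
    · simp [projQ, hu, rep, List.replicate_succ] at *
      exact ih
    · simp [projQ, hu, rep] at *
      exact ih

theorem keypart_win (U : List Char) : ∀ (V : List Char), U.length = V.length → ∀ (s : Int),
    ((PySem.List.enumerate U s).filter (fun q => q.2 == '?')).map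
      (fun q => PySem.List.pyGetD V (q.1 - s) ' ') = projQ U V := by
  induction U with
  | nil =>
    intro V h _
    simp [projQ, PySem.List.enumerate]
  | cons u U' ih =>
    intro V h s
    match V with
    | v :: V' =>
      simp only [List.length_cons, Nat.add_right_cancel_iff] at h
      rw [PySem.List.enumerate_cons]
      have hshift : ((PySem.List.enumerate U' (s+1)).filter (fun q => q.2 == '?')).map
          (fun q => PySem.List.pyGetD (v :: V') (q.1 - s) ' ') =
          ((PySem.List.enumerate U' (s+1)).filter (fun q => q.2 == '?')).map
          (fun q => PySem.List.pyGetD V' (q.1 - (s+1)) ' ') := by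
        apply List.map_congr_left
        intro q hq
        have hq' := (List.mem_filter.mp hq).1
        rw [PySem.List.mem_enumerate_iff] at hq'
        obtain ⟨j, hj, rfl⟩ := hq'
        have h1 : (s + 1 + (j : Int)) - s = ((j + 1 : Nat) : Int) := by push_cast; ring
        have h2 : (s + 1 + (j : Int)) - (s + 1) = ((j : Nat) : Int) := by push_cast; ring
        rw [h1, h2, PySem.List.pyGetD_natCast, PySem.List.pyGetD_natCast, List.getD_cons_succ]
      by_cases hu : u = '?'
      · have hhead : s - s = ((0 : Nat) : Int) := by push_cast; ring
        simp only [hu, List.filter_cons, beq_self_eq_true, if_pos, List.map_cons]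
        rw [hshift, ih V' h (s+1)]
        simp [projQ, hhead, PySem.List.pyGetD_natCast]
      · simp only [List.filter_cons]
        rw [show ((s, u).2 == '?') = false by simpa using hu]
        simp only [Bool.false_eq_true, if_false]
        rw [hshift, ih V' h (s+1)]
        simp [projQ, hu]

-- B's key for offset k is exactly the projection of the k-candidate to S's '?' positions
theorem key_eq_proj (S T : List Char) (k : Nat) (h : k + T.length ≤ S.length) :
    (pvKey (T.map rep) (pvQ S) (k : Int) (T.length : Int)).toList = projQ S (candL S T k) := by
  set m := T.length with hm
  set W := (S.drop k).take m with hW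
  set Rt := S.drop (k + m) with hR
  have hk : k ≤ S.length := by omega
  have htakelen : (S.take k).length = k := by simp; omega
  have hWlen : W.length = m := by rw [hW]; simp; omega
  have hS : S = S.take k ++ (W ++ Rt) := by
    have h1 : (S.drop k).drop m = S.drop (k + m) := by rw [List.drop_drop]
    rw [hW, hR, ← h1, List.take_append_drop, List.take_append_drop]
  unfold pvKey pvQ
  rw [String.toList_ofList, List.map_map]
  simp only [Function.comp_def]
  conv_lhs => rw [hS]
  rw [PySem.List.enumerate_append, PySem.List.enumerate_append,
      List.filter_append, List.filter_append, List.map_append, List.map_append]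
  have hcand : candL S T k = (S.take k).map rep ++ (T.map rep ++ Rt.map rep) := by
    unfold candL; simp only [← hm]; rw [← hR]; simp
  have hRHS : projQ S (candL S T k) =
      projQ (S.take k) ((S.take k).map rep) ++
        (projQ W (T.map rep) ++ projQ Rt (Rt.map rep)) := by
    rw [hcand]
    nth_rewrite 1 [hS]
    rw [projQ_append _ _ _ _ (by simp), projQ_append _ _ _ _ (by rw [hWlen]; simp [hm])]
  rw [hRHS]
  congr 1
  · rw [keypart_const _ _ 0 ?_, proj_rep]
    intro q h0 hlen
    have : q.1 < (k:Int) := by rw [htakelen] at hlen; omega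
    have : ¬ ((k:Int) ≤ q.1 ∧ q.1 < (k:Int) + (m:Int)) := by omega
    simp [this]
  congr 1
  · have hstart : (0 + ((S.take k).length : Int)) = (k : Int) := by rw [htakelen]; simp
    rw [hstart]
    have hfun : ((PySem.List.enumerate W (k:Int)).filter (fun q => q.2 == '?')).map
        (fun q => if (k:Int) ≤ q.1 ∧ q.1 < (k:Int) + (m:Int) then PySem.List.pyGetD (T.map rep) (q.1 - (k:Int)) ' ' else 'a') =
        ((PySem.List.enumerate W (k:Int)).filter (fun q => q.2 == '?')).map
        (fun q => PySem.List.pyGetD (T.map rep) (q.1 - (k:Int)) ' ') := by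
      apply List.map_congr_left
      intro q hq
      have hq' := (List.mem_filter.mp hq).1
      rw [PySem.List.mem_enumerate_iff] at hq'
      obtain ⟨j, hj, rfl⟩ := hq'
      rw [hWlen] at hj
      have : ((k:Int) ≤ (k:Int) + (j:Int) ∧ (k:Int) + (j:Int) < (k:Int) + (m:Int)) := by
        constructor <;> [omega; (push_cast; omega)]
      simp [this]
    rw [hfun, keypart_win W (T.map rep) (by rw [hWlen]; simp [hm]) (k:Int)]
  · have hstart : (0 + ((S.take k).length : Int) + (W.length : Int)) = ((k + m : Nat) : Int) := by
      rw [htakelen, hWlen]; push_cast; ring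
    rw [hstart, keypart_const _ _ _ ?_, proj_rep]
    intro q h0 hlen
    have : ¬ ((k:Int) ≤ q.1 ∧ q.1 < (k:Int) + (m:Int)) := by push_cast at h0; omega
    simp [this]

-- lexicographic comparison only sees the '?' positions when everything else agrees
theorem lex_proj (S : List Char) : ∀ (X Y : List Char), X.length = S.length → Y.length = S.length →
    (∀ p (hp : p < S.length) (hx : p < X.length) (hy : p < Y.length), S[p] ≠ '?' → X[p] = Y[p]) →
    (X < Y ↔ projQ S X < projQ S Y) := by
  induction S with
  | nil =>
    intro X Y hX hY _
    rw [List.length_nil, List.length_eq_zero_iff] at hX hY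
    subst hX; subst hY
    simp [projQ]
  | cons s S' ih =>
    intro X Y hX hY hagree
    match X, Y with
    | x :: X', y :: Y' =>
      simp only [List.length_cons, Nat.add_right_cancel_iff] at hX hY
      have htail : ∀ p (hp : p < S'.length) (hx : p < X'.length) (hy : p < Y'.length),
          S'[p] ≠ '?' → X'[p] = Y'[p] := by
        intro p hp hx hy hne
        exact hagree (p+1) (by simpa using hp) (by simpa using hx) (by simpa using hy) (by simpa using hne)
      have ihXY := ih X' Y' hX hY htail
      by_cases hs : s = '?'
      · have hproj : projQ (s :: S') (x :: X') = x :: projQ S' X' := by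
          simp [projQ, hs]
        have hproj' : projQ (s :: S') (y :: Y') = y :: projQ S' Y' := by
          simp [projQ, hs]
        rw [hproj, hproj', List.cons_lt_cons_iff, List.cons_lt_cons_iff, ihXY]
      · have hxy : x = y := hagree 0 (by simp) (by simp) (by simp) (by simpa using hs)
        have hproj : projQ (s :: S') (x :: X') = projQ S' X' := by
          simp [projQ, hs]
        have hproj' : projQ (s :: S') (y :: Y') = projQ S' Y' := by
          simp [projQ, hs]
        rw [hproj, hproj', List.cons_lt_cons_iff, hxy]
        simp [ihXY]

-- A's replace-at-the-end candidate equals the spliced candL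
theorem cand_str_eq (S T : List Char) (k : Nat) (h : k + T.length ≤ S.length) :
    pvCandStr S T (k : Int) = String.ofList (candL S T k) := by
  unfold pvCandStr
  have hcand : pvCand S T (k : Int) = S.take k ++ (T ++ S.drop (k + T.length)) := by
    unfold pvCand
    rw [PySem.List.slice_to_natCast]
    have : (k : Int) + (T.length : Int) = ((k + T.length : Nat) : Int) := by push_cast; ring
    rw [this, PySem.List.slice_from_natCast]
    simp
  rw [hcand, replace_eq_map]
  unfold candL
  simp

-- comparing keys is comparing candidates, for two valid in-range offsets
theorem key_lt_iff (S T : List Char) (j k : Nat)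
    (hj : j + T.length ≤ S.length) (hk : k + T.length ≤ S.length)
    (hoj : okWinProp S T j) (hok : okWinProp S T k) :
    (pvKey (T.map rep) (pvQ S) (j : Int) (T.length : Int) <
      pvKey (T.map rep) (pvQ S) (k : Int) (T.length : Int)) ↔
    (String.ofList (candL S T j) < String.ofList (candL S T k)) := by
  have hagree : ∀ p (hp : p < S.length) (hx : p < (candL S T j).length)
      (hy : p < (candL S T k).length), S[p] ≠ '?' → (candL S T j)[p] = (candL S T k)[p] := by
    intro p hp hx hy hne
    have hne' : S.getD p ' ' ≠ '?' := by rw [List.getD_eq_getElem _ _ hp]; exact hne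
    have h1 := cand_getD_of_ne S T j hj hoj p hp hne'
    have h2 := cand_getD_of_ne S T k hk hok p hp hne'
    rw [List.getD_eq_getElem _ _ hx] at h1
    rw [List.getD_eq_getElem _ _ hy] at h2
    rw [h1, h2]
  rw [String.lt_iff_toList_lt, key_eq_proj S T j hj, key_eq_proj S T k hk,
      String.lt_iff_toList_lt, String.toList_ofList, String.toList_ofList]
  exact (lex_proj S (candL S T j) (candL S T k)
    (length_candL S T j hj) (length_candL S T k hk) hagree).symm

-- B's in-place patch loop builds exactly the spliced candidate
theorem patch_eq (Tr : List Char) : ∀ (bi : Nat) (L : List Char), bi + Tr.length ≤ L.length →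
    (PySem.List.pyRange 0 (Tr.length : Int) 1).foldl
      (fun base k => base.set ((bi : Int) + k).toNat (PySem.List.pyGetD Tr k ' ')) L =
    L.take bi ++ Tr ++ L.drop (bi + Tr.length) := by
  induction Tr using List.reverseRecOn with
  | nil =>
    intro bi L _
    simp [PySem.List.pyRange]
  | append_singleton T0 c ih =>
    intro bi L hlen
    have hnil : PySem.List.pyRange ((T0.length : Int) + 1) ((T0.length : Int) + 1) 1 = [] :=
      List.eq_nil_of_length_eq_zero (by rw [PySem.List.length_pyRange_one]; omega)
    have hsplit : PySem.List.pyRange 0 ((T0 ++ [c]).length : Int) 1 =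
        PySem.List.pyRange 0 (T0.length : Int) 1 ++ [(T0.length : Int)] := by
      rw [List.length_append, List.length_cons, List.length_nil,
          show ((T0.length + 1 : Nat) : Int) = (T0.length : Int) + 1 by push_cast; ring,
          PySem.List.pyRange_one_append 0 (T0.length : Int) ((T0.length : Int) + 1)
            (by positivity) (by omega)]
      congr 1
      rw [PySem.List.pyRange_one_cons (by omega), hnil]
    rw [hsplit, List.foldl_append]
    have hfold : (PySem.List.pyRange 0 (T0.length : Int) 1).foldl
        (fun base k => base.set ((bi : Int) + k).toNat (PySem.List.pyGetD (T0 ++ [c]) k ' ')) L =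
        (PySem.List.pyRange 0 (T0.length : Int) 1).foldl
        (fun base k => base.set ((bi : Int) + k).toNat (PySem.List.pyGetD T0 k ' ')) L := by
      apply PySem.List.foldl_congr_mem
      intro acc x hx
      rw [PySem.List.mem_pyRange_one] at hx
      obtain ⟨h0, hlt⟩ := hx
      congr 1
      rw [show x = ((x.toNat : Nat) : Int) from (Int.toNat_of_nonneg h0).symm,
          PySem.List.pyGetD_natCast, PySem.List.pyGetD_natCast,
          List.getD_append _ _ _ _ (by omega)]
    rw [hfold, ih bi L (by simp at hlen; omega)]
    simp only [List.foldl_cons, List.foldl_nil]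
    have hbl : bi + T0.length < L.length := by simp at hlen; omega
    have htk : (L.take bi).length = bi := by simp; omega
    have hidx : (((bi : Int)) + (T0.length : Int)).toNat = bi + T0.length := by omega
    have hget : PySem.List.pyGetD (T0 ++ [c]) (T0.length : Int) ' ' = c := by
      rw [PySem.List.pyGetD_natCast, List.getD_append_right _ _ _ _ (by omega)]
      simp
    rw [hidx, hget]
    rw [List.append_assoc, List.set_append, if_neg (by rw [htk]; omega), htk,
        show bi + T0.length - bi = T0.length from by omega,
        List.set_append, if_neg (by omega),
        show T0.length - T0.length = 0 from by omega,
        List.drop_eq_getElem_cons hbl]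
    simp only [List.append_assoc, List.set_cons_zero]
    simp [show bi + (T0.length + 1) = bi + T0.length + 1 from by omega]

-- what B's loop computes: nothing, or a valid offset whose key no other valid key beats
theorem loop_char (S T Tr : List Char) (Q : List Int) (l : List Int) :
    (l.foldl (pvStep S T Tr Q) (none, none) = (none, none) ∧ ∀ j ∈ l, pvOkB S T j = false)
    ∨ ∃ bi, l.foldl (pvStep S T Tr Q) (none, none) =
          (some bi, some (pvKey Tr Q bi (T.length : Int)))
        ∧ bi ∈ l ∧ pvOkB S T bi = true
        ∧ ∀ j ∈ l, pvOkB S T j = true →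
            ¬ pvKey Tr Q j (T.length : Int) < pvKey Tr Q bi (T.length : Int) := by
  induction l using List.reverseRecOn with
  | nil => left; simp
  | append_singleton l0 x ih =>
    rw [List.foldl_append, List.foldl_cons, List.foldl_nil]
    rcases ih with ⟨heq, hall⟩ | ⟨bi, heq, hmem, hok, hmin⟩
    · rw [heq]
      by_cases hx : pvOkB S T x = true
      · right
        refine ⟨x, ?_, by simp, hx, ?_⟩
        · simp [pvStep, hx]
        · intro j hj hokj
          rcases List.mem_append.mp hj with hj | hj
          · rw [hall j hj] at hokj; cases hokj
          · rw [List.mem_singleton.mp hj]; exact lt_irrefl _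
      · left
        constructor
        · simp [pvStep, hx]
        · intro j hj
          rcases List.mem_append.mp hj with hj | hj
          · exact hall j hj
          · rw [List.mem_singleton.mp hj]; simpa using hx
    · rw [heq]
      by_cases hx : pvOkB S T x = true
      · by_cases hlt : pvKey Tr Q x (T.length : Int) < pvKey Tr Q bi (T.length : Int)
        · right
          refine ⟨x, by simp [pvStep, hx, hlt], by simp, hx, ?_⟩
          intro j hj hokj
          rcases List.mem_append.mp hj with hj | hj
          · exact fun hc => hmin j hj hokj (lt_trans hc hlt)
          · rw [List.mem_singleton.mp hj]; exact lt_irrefl _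
        · right
          refine ⟨bi, by simp [pvStep, hx, hlt], by simp [hmem], hok, ?_⟩
          intro j hj hokj
          rcases List.mem_append.mp hj with hj | hj
          · exact hmin j hj hokj
          · rw [List.mem_singleton.mp hj]; exact hlt
      · right
        refine ⟨bi, by simp [pvStep, hx], by simp [hmem], hok, ?_⟩
        intro j hj hokj
        rcases List.mem_append.mp hj with hj | hj
        · exact hmin j hj hokj
        · rw [List.mem_singleton.mp hj] at hokj ⊢; rw [hokj] at hx; cases hx rfl

-- the running-minimum loop over some-state computes the fold of min
theorem pv_foldl_minUpd (t : List String) (x : String) :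
    t.foldl pvMinUpd (some x) = some (t.foldl min x) := by
  induction t generalizing x with
  | nil => rfl
  | cons c t ih =>
    have hstep : pvMinUpd (some x) c = some (min x c) := by
      simp only [pvMinUpd, min_def]
      split_ifs with h1 h2 h3
      · exact absurd h1 (not_lt.mpr h2)
      · rfl
      · rfl
      · exact absurd (lt_of_not_ge h3) h1
    simp only [List.foldl_cons, hstep, ih]

-- head of the sorted list = running minimum, packaged with A's final readout
theorem pv_final (V : List String) :
    (if 0 < (PySem.List.sorted V (fun x => x) false).length
      then PySem.List.pyGetD (PySem.List.sorted V (fun x => x) false) 0 ""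
      else "UNRESTORABLE") =
    (match V.foldl pvMinUpd none with
      | some b => b
      | none => "UNRESTORABLE") := by
  cases V with
  | nil => simp [(PySem.List.sorted_eq_nil_iff ([] : List String) (fun x => x) false).mpr rfl]
  | cons h t =>
    have hne : PySem.List.sorted (h :: t) (fun x => x) false ≠ [] := by
      rw [Ne, PySem.List.sorted_eq_nil_iff]; simp
    obtain ⟨hd, tl, hs⟩ := List.exists_cons_of_ne_nil hne
    have hmin := pv_foldl_minUpd t h
    simp only [List.foldl_cons, pvMinUpd] at *
    rw [hs, hmin]
    have hlen : 0 < (hd :: tl).length := by simp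
    rw [if_pos hlen]
    have hgd : PySem.List.pyGetD (hd :: tl) 0 "" = hd := by
      simp [PySem.List.pyGetD, PySem.List.pyGet?, PySem.List.pyIdx?]
    rw [hgd]
    have hd_le : ∀ y ∈ h :: t, hd ≤ y := by
      have := PySem.List.key_head_sorted_le (xs := h :: t) (key := fun x => x) hs
      simpa using this
    have hd_mem : hd ∈ h :: t := by
      have : hd ∈ PySem.List.sorted (h :: t) (fun x => x) false := by rw [hs]; simp
      exact (PySem.List.mem_sorted _ _ _ _).mp this
    have hm_le_h : t.foldl min h ≤ h := (PySem.List.foldl_min_le t h).1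
    have hm_le : ∀ y ∈ t, t.foldl min h ≤ y := (PySem.List.foldl_min_le t h).2
    have hm_mem : t.foldl min h ∈ h :: t := by
      rcases PySem.List.foldl_min_mem t h with h1 | h1
      · rw [h1]; exact List.mem_cons_self
      · exact List.mem_cons_of_mem _ h1
    have h1 : hd ≤ t.foldl min h := hd_le _ hm_mem
    have h2 : t.foldl min h ≤ hd := by
      rcases List.mem_cons.mp hd_mem with h3 | h3
      · rw [h3]; exact hm_le_h
      · exact hm_le _ h3
    exact le_antisymm h1 h2

-- the two '?'→'a' base maps are the same function
theorem pvBase_eq (S : List Char) : pvBase S = S.map rep := by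
  unfold pvBase
  apply List.map_congr_left
  intro c _
  by_cases h : c = '?' <;> simp [h, rep]

-- ===== VERDICT (by name: the statement is the Claim_ definition above) =====
theorem solve_spec : Claim_equal_solve := by
  intro S T _
  unfold Spec_solve solve solve_alt
  dsimp only
  set Sl := S.toList with hSl
  set Tl := T.toList with hTl
  set R := PySem.List.pyRange 0 (PySem.Str.len S - PySem.Str.len T + 1) 1 with hR
  have hSlen : PySem.Str.len S = (Sl.length : Int) := by simp [hSl]
  have hTlen : PySem.Str.len T = (Tl.length : Int) := by simp [hTl]
  have hTr : pvRepChars Tl = Tl.map rep := replace_eq_map Tl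
  have hrange : ∀ i ∈ R, 0 ≤ i ∧ i.toNat + Tl.length ≤ Sl.length := by
    intro i hi
    rw [hR, PySem.List.mem_pyRange_one] at hi
    rw [hSlen, hTlen] at hi
    omega
  have hok : ∀ i ∈ R, pvOkA Sl Tl i = pvOkB Sl Tl i := by
    intro i hi
    obtain ⟨h0, hle⟩ := hrange i hi
    rw [show i = ((i.toNat : Nat) : Int) from (Int.toNat_of_nonneg h0).symm]
    exact okA_eq_okB Sl Tl i.toNat hle
  rw [PySem.List.foldl_append_if, List.nil_append]
  rw [pv_final ((R.filter (fun i => pvOkA Sl Tl i)).map (pvCandStr Sl Tl))]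
  rcases loop_char Sl Tl (pvRepChars Tl) (pvQ Sl) R with ⟨heq, hall⟩ | ⟨bi, heq, hmem, hokbi, hmin⟩
  · rw [heq]
    have hfilt : R.filter (fun i => pvOkA Sl Tl i) = [] := by
      rw [List.filter_eq_nil_iff]
      intro i hi
      rw [hok i hi, hall i hi]
      simp
    rw [hfilt]
    rfl
  · rw [heq]
    dsimp only
    obtain ⟨h0, hle⟩ := hrange bi hmem
    set k := bi.toNat with hkdef
    have hbi : bi = ((k : Nat) : Int) := (Int.toNat_of_nonneg h0).symm
    -- B's readout is the spliced candidate for offset k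
    have hTrlen : (Tl.map rep).length = Tl.length := by simp
    have hBval : String.ofList ((PySem.List.pyRange 0 (PySem.Str.len T) 1).foldl
        (fun base j => base.set (bi + j).toNat (PySem.List.pyGetD (pvRepChars Tl) j ' '))
        (pvBase Sl)) = String.ofList (candL Sl Tl k) := by
      rw [hTr, pvBase_eq, hTlen, hbi]
      rw [show (Tl.length : Int) = ((Tl.map rep).length : Int) by rw [hTrlen]]
      rw [patch_eq (Tl.map rep) k (Sl.map rep) (by rw [hTrlen]; simp; omega)]
      unfold candL
      rw [hTrlen, List.map_take, List.map_drop]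
    rw [hBval]
    -- A's candidate list is nonempty: it contains the k-candidate
    have hokA_bi : pvOkA Sl Tl bi = true := by rw [hok bi hmem]; exact hokbi
    have hmemf : bi ∈ R.filter (fun i => pvOkA Sl Tl i) := List.mem_filter.mpr ⟨hmem, hokA_bi⟩
    have hmemL : pvCandStr Sl Tl bi ∈ (R.filter (fun i => pvOkA Sl Tl i)).map (pvCandStr Sl Tl) :=
      List.mem_map_of_mem hmemf
    obtain ⟨h1, t1, hL⟩ := List.exists_cons_of_ne_nil (List.ne_nil_of_mem hmemL)
    rw [hL, List.foldl_cons]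
    show (match (t1.foldl pvMinUpd (pvMinUpd none h1)) with
        | some b => b | none => "UNRESTORABLE") = _
    rw [show pvMinUpd none h1 = some h1 from rfl, pv_foldl_minUpd]
    show t1.foldl min h1 = _
    -- the fold of min is the least element of the list; so is the k-candidate
    set v := t1.foldl min h1 with hv
    have hvmem : v ∈ (R.filter (fun i => pvOkA Sl Tl i)).map (pvCandStr Sl Tl) := by
      rw [hL]
      rcases PySem.List.foldl_min_mem t1 h1 with h2 | h2
      · rw [hv, h2]; exact List.mem_cons_self
      · exact List.mem_cons_of_mem _ (hv ▸ h2)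
    have hvle : ∀ y ∈ (R.filter (fun i => pvOkA Sl Tl i)).map (pvCandStr Sl Tl), v ≤ y := by
      intro y hy
      rw [hL] at hy
      rcases List.mem_cons.mp hy with h2 | h2
      · rw [h2, hv]; exact (PySem.List.foldl_min_le t1 h1).1
      · exact (PySem.List.foldl_min_le t1 h1).2 y h2
    -- the k-candidate is ≤ every candidate, via the key comparison
    have hcand_le : ∀ y ∈ (R.filter (fun i => pvOkA Sl Tl i)).map (pvCandStr Sl Tl),
        String.ofList (candL Sl Tl k) ≤ y := by
      intro y hy
      obtain ⟨j, hjf, rfl⟩ := List.mem_map.mp hy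
      obtain ⟨hjR, hokA_j⟩ := List.mem_filter.mp hjf
      obtain ⟨hj0, hjle⟩ := hrange j hjR
      set kj := j.toNat with hkj
      have hbj : j = ((kj : Nat) : Int) := (Int.toNat_of_nonneg hj0).symm
      have hwin_j : okWinProp Sl Tl kj := by
        rw [← okB_iff]
        rw [← hbj, ← hok j hjR]
        exact hokA_j
      have hwin_k : okWinProp Sl Tl k := by
        rw [← okB_iff, ← hbi]
        exact hokbi
      have hnlt := hmin j hjR (by rw [← hok j hjR]; exact hokA_j)
      rw [hTr, hbi, hbj] at hnlt
      rw [key_lt_iff Sl Tl kj k hjle hle hwin_j hwin_k] at hnlt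
      rw [hbj, cand_str_eq Sl Tl kj hjle]
      exact not_lt.mp hnlt
    have hcand_mem : String.ofList (candL Sl Tl k) ∈
        (R.filter (fun i => pvOkA Sl Tl i)).map (pvCandStr Sl Tl) := by
      rw [← cand_str_eq Sl Tl k hle, ← hbi]
      exact hmemL
    exact le_antisymm (hvle _ hcand_mem) (hcand_le _ hvmem)
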